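-- pv_equiv track=rewrite | github.com/onurtore/COMP551Homeworks | comp451_assignment2_2020/comp451/layers.py | next_window
-- ===== SOURCE A (Python) =====
-- def next_window(matrix_shape,kernel_size,stride):
--   """
--   Given a matrix it returns the window coordinates and output coordinates
--   If no more window left then it returns -1
--
--   Please refer to conv_forward_naive function to more information
--   about the params
--   """
--
--   window_x     = 0
--   coordinate_x = 0
--   while (window_x + kernel_size[0]) <= matrix_shape[0]:
--     window_y     = 0
--     coordinate_y = 0
--     while (window_y+kernel_size[1]) <= matrix_shape[1]:
--       yield (window_x,window_y,coordinate_x,coordinate_y)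
--       window_y     += stride
--       coordinate_y += 1
--     window_x     += stride
--     coordinate_x += 1
--   return -1
-- ===== SOURCE B (Python) =====
-- def next_window(matrix_shape, kernel_size, stride):
--     # Flat enumeration: one single loop over the total number of windows,
--     # decoding the row/column coordinates of each flat index with divmod.
--     nx = (matrix_shape[0] - kernel_size[0]) // stride + 1 if kernel_size[0] <= matrix_shape[0] else 0
--     ny = (matrix_shape[1] - kernel_size[1]) // stride + 1 if kernel_size[1] <= matrix_shape[1] else 0
--     for k in range(nx * ny):
--         i, j = divmod(k, ny)
--         yield (i * stride, j * stride, i, j)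
-- ===== Notes on version B (the rewrite author's own statement) =====
-- stated objective: alternative
-- what changed: Replaces A's two nested while-loops with incremental window/coordinate counters by a single flat loop over the closed-form total window count nx*ny, decoding each flat index into its (row, column) pair with divmod and recovering window positions by multiplication.
-- outside the precondition, e.g. on next_window((2, 5), (3, 2), 0): A returns [], B raises ZeroDivisionError
import Mathlib
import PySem

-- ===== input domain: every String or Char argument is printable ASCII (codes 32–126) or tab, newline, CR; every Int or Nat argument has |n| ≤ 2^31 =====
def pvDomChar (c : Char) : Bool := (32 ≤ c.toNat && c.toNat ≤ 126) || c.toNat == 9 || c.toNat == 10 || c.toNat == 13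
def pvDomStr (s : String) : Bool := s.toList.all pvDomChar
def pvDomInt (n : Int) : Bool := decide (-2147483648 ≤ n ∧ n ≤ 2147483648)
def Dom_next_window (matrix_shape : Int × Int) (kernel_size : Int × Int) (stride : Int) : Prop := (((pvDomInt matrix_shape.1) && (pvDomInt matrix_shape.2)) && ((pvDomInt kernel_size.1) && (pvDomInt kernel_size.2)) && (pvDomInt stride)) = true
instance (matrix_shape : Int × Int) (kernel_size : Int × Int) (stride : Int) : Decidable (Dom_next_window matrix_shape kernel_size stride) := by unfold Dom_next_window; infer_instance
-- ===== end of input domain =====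

-- B replaces A's two incremental while-loops by one flat loop over the closed-form
-- total window count, decoding coordinates with divmod (objective: alternative).


-- ===== PORT A =====
-- inner while loop of A; fuel only makes the recursion total (it never cuts a
-- run short inside Pre_, where the loop terminates)
def nwInnerA (m1 k1 stride wx cx : Int) : Nat → Int → Int → List (Int × Int × Int × Int)
  | 0, _, _ => []
  | f + 1, wy, cy =>
    if wy + k1 ≤ m1 then (wx, wy, cx, cy) :: nwInnerA m1 k1 stride wx cx f (wy + stride) (cy + 1)
    else []

-- outer while loop of A
def nwOuterA (ms ks : Int × Int) (stride : Int) : Nat → Int → Int → List (Int × Int × Int × Int)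
  | 0, _, _ => []
  | f + 1, wx, cx =>
    if wx + ks.1 ≤ ms.1 then
      nwInnerA ms.2 ks.2 stride wx cx ((ms.2 - ks.2).toNat + 1) 0 0 ++
        nwOuterA ms ks stride f (wx + stride) (cx + 1)
    else []

def next_window (matrix_shape : Int × Int) (kernel_size : Int × Int) (stride : Int) : List (Int × Int × Int × Int) :=
  nwOuterA matrix_shape kernel_size stride ((matrix_shape.1 - kernel_size.1).toNat + 1) 0 0

-- ===== PORT B =====
def next_window_alt (matrix_shape : Int × Int) (kernel_size : Int × Int) (stride : Int) : List (Int × Int × Int × Int) :=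
  let nx : Int := if kernel_size.1 ≤ matrix_shape.1 then PySem.Int.floordiv (matrix_shape.1 - kernel_size.1) stride + 1 else 0
  let ny : Int := if kernel_size.2 ≤ matrix_shape.2 then PySem.Int.floordiv (matrix_shape.2 - kernel_size.2) stride + 1 else 0
  (PySem.List.pyRange 0 (nx * ny) 1).map (fun k =>
    let i := PySem.Int.floordiv k ny
    let j := PySem.Int.mod k ny
    (i * stride, j * stride, i, j))

-- ===== PRECONDITION & SPEC =====
-- Pre_ excludes the bad-stride inputs: for stride ≤ 0 with the kernel fitting in the
-- x-dimension A (a generator) loops forever, and for stride = 0 B's closed-form count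
-- divides by zero; negative strides whose kernel does not fit in x stay admitted.
def Pre_next_window (matrix_shape : Int × Int) (kernel_size : Int × Int) (stride : Int) : Prop :=
  1 ≤ stride ∨ (matrix_shape.1 < kernel_size.1 ∧ stride ≠ 0)
instance (matrix_shape : Int × Int) (kernel_size : Int × Int) (stride : Int) : Decidable (Pre_next_window matrix_shape kernel_size stride) := by unfold Pre_next_window; infer_instance
def pvWitness_next_window : (Int × Int) × (Int × Int) × Int := ((5, 4), (2, 2), 1)

def Spec_next_window (matrix_shape : Int × Int) (kernel_size : Int × Int) (stride : Int) (out : List (Int × Int × Int × Int)) : Prop := out = next_window_alt matrix_shape kernel_size stride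
instance (matrix_shape : Int × Int) (kernel_size : Int × Int) (stride : Int) (out : List (Int × Int × Int × Int)) : Decidable (Spec_next_window matrix_shape kernel_size stride out) := by unfold Spec_next_window; infer_instance

-- ===== CLAIM (what is proved, stated in full; the proofs are below) =====
def Claim_equal_next_window : Prop := ∀ (matrix_shape : Int × Int) (kernel_size : Int × Int) (stride : Int), Dom_next_window matrix_shape kernel_size stride → Pre_next_window matrix_shape kernel_size stride → Spec_next_window matrix_shape kernel_size stride (next_window matrix_shape kernel_size stride)

-- ===== LEMMAS AND PROOFS =====

-- the closed-form window count B uses for each dimension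
def nwCnt (m k stride : Int) : Int :=
  if k ≤ m then PySem.Int.floordiv (m - k) stride + 1 else 0

lemma next_window_alt_eq (ms ks : Int × Int) (stride : Int) :
    next_window_alt ms ks stride =
      (PySem.List.pyRange 0 (nwCnt ms.1 ks.1 stride * nwCnt ms.2 ks.2 stride) 1).map (fun k =>
        (PySem.Int.floordiv k (nwCnt ms.2 ks.2 stride) * stride,
         PySem.Int.mod k (nwCnt ms.2 ks.2 stride) * stride,
         PySem.Int.floordiv k (nwCnt ms.2 ks.2 stride),
         PySem.Int.mod k (nwCnt ms.2 ks.2 stride))) := rfl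

lemma nwGuard_iff (m k stride j : Int) (hs : 1 ≤ stride) (hj : 0 ≤ j) :
    j * stride + k ≤ m ↔ j < nwCnt m k stride := by
  unfold nwCnt
  split_ifs with h
  · rw [PySem.Int.floordiv_eq_ediv_of_pos (by omega)]
    rw [Int.lt_add_one_iff, Int.le_ediv_iff_mul_le (by omega : (0:Int) < stride)]
    omega
  · have hnn : 0 ≤ j * stride := mul_nonneg hj (by omega)
    constructor
    · intro hle; omega
    · intro hlt; omega

lemma nwCnt_le (m k stride : Int) (hs : 1 ≤ stride) (h : k ≤ m) :
    nwCnt m k stride ≤ m - k + 1 := by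
  unfold nwCnt
  rw [if_pos h, PySem.Int.floordiv_eq_ediv_of_pos (by omega)]
  have := Int.ediv_le_self stride (by omega : (0:Int) ≤ m - k)
  omega

lemma nwCnt_nonneg (m k stride : Int) (hs : 1 ≤ stride) : 0 ≤ nwCnt m k stride := by
  unfold nwCnt
  split_ifs with h
  · rw [PySem.Int.floordiv_eq_ediv_of_pos (by omega)]
    have := Int.ediv_nonneg (by omega : (0:Int) ≤ m - k) (by omega : (0:Int) ≤ stride)
    omega
  · omega

lemma nwCnt_nonpos_of_lt (m k stride : Int) (h : m < k) : nwCnt m k stride = 0 := by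
  unfold nwCnt; rw [if_neg (by omega)]

lemma nwInnerA_eq (m1 k1 stride wx cx : Int) (hs : 1 ≤ stride) :
    ∀ (fuel : Nat) (j : Int), 0 ≤ j → (nwCnt m1 k1 stride - j).toNat ≤ fuel →
      nwInnerA m1 k1 stride wx cx fuel (j * stride) j =
        (PySem.List.pyRange j (nwCnt m1 k1 stride) 1).map (fun jj => (wx, jj * stride, cx, jj)) := by
  intro fuel
  induction fuel with
  | zero =>
    intro j hj hf
    have hle : nwCnt m1 k1 stride ≤ j := by omega
    rw [PySem.List.pyRange_one_eq_nil hle]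
    simp [nwInnerA]
  | succ f ih =>
    intro j hj hf
    simp only [nwInnerA]
    by_cases hg : j * stride + k1 ≤ m1
    · have hjlt : j < nwCnt m1 k1 stride := (nwGuard_iff m1 k1 stride j hs hj).mp hg
      rw [if_pos hg, PySem.List.pyRange_one_cons hjlt, List.map_cons]
      have hmul : j * stride + stride = (j + 1) * stride := by ring
      rw [hmul, ih (j + 1) (by omega) (by omega)]
    · have hge : nwCnt m1 k1 stride ≤ j := by
        by_contra hc
        exact hg ((nwGuard_iff m1 k1 stride j hs hj).mpr (by omega))
      rw [if_neg hg, PySem.List.pyRange_one_eq_nil hge]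
      simp

lemma nwOuterA_eq (ms ks : Int × Int) (stride : Int) (hs : 1 ≤ stride) :
    ∀ (fuel : Nat) (i : Int), 0 ≤ i → (nwCnt ms.1 ks.1 stride - i).toNat ≤ fuel →
      nwOuterA ms ks stride fuel (i * stride) i =
        (PySem.List.pyRange i (nwCnt ms.1 ks.1 stride) 1).flatMap (fun ii =>
          (PySem.List.pyRange 0 (nwCnt ms.2 ks.2 stride) 1).map (fun j => (ii * stride, j * stride, ii, j))) := by
  intro fuel
  induction fuel with
  | zero =>
    intro i hi hf
    have hle : nwCnt ms.1 ks.1 stride ≤ i := by omega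
    rw [PySem.List.pyRange_one_eq_nil hle]
    simp [nwOuterA]
  | succ f ih =>
    intro i hi hf
    simp only [nwOuterA]
    by_cases hg : i * stride + ks.1 ≤ ms.1
    · have hilt : i < nwCnt ms.1 ks.1 stride := (nwGuard_iff ms.1 ks.1 stride i hs hi).mp hg
      rw [if_pos hg, PySem.List.pyRange_one_cons hilt, List.flatMap_cons]
      congr 1
      · have h0 : (0 : Int) = 0 * stride := by ring
        have hfin : (nwCnt ms.2 ks.2 stride - 0).toNat ≤ (ms.2 - ks.2).toNat + 1 := by
          by_cases h2 : ks.2 ≤ ms.2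
          · have := nwCnt_le ms.2 ks.2 stride hs h2; omega
          · rw [nwCnt_nonpos_of_lt ms.2 ks.2 stride (by omega)]; omega
        calc nwInnerA ms.2 ks.2 stride (i * stride) i ((ms.2 - ks.2).toNat + 1) 0 0
            = nwInnerA ms.2 ks.2 stride (i * stride) i ((ms.2 - ks.2).toNat + 1) (0 * stride) 0 := by
              rw [← h0]
          _ = _ := nwInnerA_eq ms.2 ks.2 stride (i * stride) i hs _ 0 le_rfl hfin
      · have hmul : i * stride + stride = (i + 1) * stride := by ring
        rw [hmul, ih (i + 1) (by omega) (by omega)]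
    · have hge : nwCnt ms.1 ks.1 stride ≤ i := by
        by_contra hc
        exact hg ((nwGuard_iff ms.1 ks.1 stride i hs hi).mpr (by omega))
      rw [if_neg hg, PySem.List.pyRange_one_eq_nil hge]
      simp

-- flattening lemma: the flat divmod enumeration equals the nested one (0 < ny)
lemma flat_eq_nested {α : Type} (ny : Int) (hny : 0 < ny) (f : Int → Int → α) :
    ∀ (n : Nat),
      (PySem.List.pyRange 0 ((n : Int) * ny) 1).map (fun k => f (k / ny) (k % ny)) =
        (PySem.List.pyRange 0 (n : Int) 1).flatMap (fun i => (PySem.List.pyRange 0 ny 1).map (f i)) := by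
  intro n
  induction n with
  | zero => simp [PySem.List.pyRange_one_eq_nil]
  | succ n ih =>
    have h1 : (0 : Int) ≤ (n : Int) * ny := mul_nonneg (by positivity) (by omega)
    have h2 : (n : Int) * ny ≤ ((n + 1 : Nat) : Int) * ny := by push_cast; nlinarith
    have hsplit := PySem.List.pyRange_one_append 0 ((n : Int) * ny) (((n + 1 : Nat) : Int) * ny) h1 h2
    rw [hsplit, List.map_append, ih]
    have hsucc : ((n + 1 : Nat) : Int) = (n : Int) + 1 := by push_cast; ring
    rw [hsucc, PySem.List.pyRange_one_succ_right (by positivity), List.flatMap_append]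
    congr 1
    -- last chunk: k = n*ny + j with 0 ≤ j < ny
    have hlen : (((n : Int) + 1) * ny - (n : Int) * ny) = ny := by ring
    rw [PySem.List.pyRange_one ((n : Int) * ny) (((n:Int)+1) * ny), hlen]
    rw [PySem.List.pyRange_one 0 ny]
    simp only [List.flatMap_cons, List.flatMap_nil, List.append_nil, List.map_map, Int.sub_zero]
    apply List.map_congr_left
    intro j hj
    simp only [List.mem_range] at hj
    have hjlt : (j : Int) < ny := by omega
    have hdiv : ((n : Int) * ny + (j : Int)) / ny = n := by
      rw [Int.add_comm, Int.add_mul_ediv_right _ _ (by omega : ny ≠ 0),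
        Int.ediv_eq_zero_of_lt (by positivity) hjlt]
      omega
    have hmod : ((n : Int) * ny + (j : Int)) % ny = (j : Int) := by
      rw [Int.add_comm, Int.mul_comm, Int.add_mul_emod_self_left]
      exact Int.emod_eq_of_lt (by positivity) hjlt
    simp [hdiv, hmod]

-- B's flat enumeration equals the nested flatMap form (stride ≥ 1)
lemma alt_eq_nested (ms ks : Int × Int) (stride : Int) (hs : 1 ≤ stride) :
    next_window_alt ms ks stride =
      (PySem.List.pyRange 0 (nwCnt ms.1 ks.1 stride) 1).flatMap (fun i =>
        (PySem.List.pyRange 0 (nwCnt ms.2 ks.2 stride) 1).map (fun j => (i * stride, j * stride, i, j))) := by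
  rw [next_window_alt_eq]
  set ny := nwCnt ms.2 ks.2 stride with hny_def
  set nx := nwCnt ms.1 ks.1 stride with hnx_def
  by_cases hny : 0 < ny
  · have hnx : 0 ≤ nx := nwCnt_nonneg ms.1 ks.1 stride hs
    obtain ⟨n, hn⟩ : ∃ n : Nat, nx = (n : Int) := ⟨nx.toNat, by omega⟩
    have := flat_eq_nested ny hny (fun i j => (i * stride, j * stride, i, j)) n
    rw [hn]
    rw [← this]
    apply List.map_congr_left
    intro k hk
    rw [PySem.List.mem_pyRange_one] at hk
    simp only [PySem.Int.floordiv_eq_ediv_of_pos hny, PySem.Int.mod_eq_emod_of_pos hny]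
  · have hny0 : ny = 0 := by
      have := nwCnt_nonneg ms.2 ks.2 stride hs; omega
    rw [hny0]
    simp [PySem.List.pyRange_one_eq_nil]

-- ===== VERDICT (by name: the statement is the Claim_ definition above) =====
theorem next_window_spec : Claim_equal_next_window := by
  intro ms ks stride _ hpre
  unfold Spec_next_window next_window
  rcases hpre with hs | ⟨hlt, _⟩
  · rw [alt_eq_nested ms ks stride hs]
    have hfuel : (nwCnt ms.1 ks.1 stride - 0).toNat ≤ (ms.1 - ks.1).toNat + 1 := by
      by_cases h1 : ks.1 ≤ ms.1
      · have := nwCnt_le ms.1 ks.1 stride hs h1; omega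
      · rw [nwCnt_nonpos_of_lt ms.1 ks.1 stride (by omega)]; omega
    have h0 : (0 : Int) = 0 * stride := by ring
    calc nwOuterA ms ks stride ((ms.1 - ks.1).toNat + 1) 0 0
        = nwOuterA ms ks stride ((ms.1 - ks.1).toNat + 1) (0 * stride) 0 := by rw [← h0]
      _ = _ := nwOuterA_eq ms ks stride hs _ 0 le_rfl hfuel
  · -- kernel does not fit in x: both sides are empty
    have h0 : (ms.1 - ks.1).toNat = 0 := by omega
    rw [next_window_alt_eq, nwCnt_nonpos_of_lt ms.1 ks.1 stride hlt]
    rw [h0]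
    have hguard : ¬ ((0 : Int) + ks.1 ≤ ms.1) := by omega
    simp only [nwOuterA]
    rw [if_neg hguard]
    rw [Int.zero_mul, PySem.List.pyRange_one_eq_nil le_rfl, List.map_nil]
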